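-- pv_equiv track=rewrite | github.com/predros/tcc | functions.py | VectorOrder
-- ===== SOURCE A (Python) =====
-- def VectorOrder(X, DOF, size):
--     """
--     Divides the nodal displacement matrix into three matrices,
--     relative to the three axes.
--     """
--     row = 0
--     A = []
--     for i in range(0, size):
--         if (i in DOF):
--             row = DOF.index(i)
--             A.append(X[row])
--         else:
--             A.append(0)
--     return A
-- ===== SOURCE B (Python) =====
-- def VectorOrder(X, DOF, size):
--     A = [0] * size
--     seen = set()
--     for i, val in enumerate(DOF):
--         if 0 <= val < size and val not in seen:
--             seen.add(val)
--             A[val] = X[i]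
--     return A
-- ===== Notes on version B (the rewrite author's own statement) =====
-- stated objective: faster
-- what changed: Replaced the gather loop over output positions (with a membership test and list.index rescan of DOF per position) by a single scatter pass over DOF with enumerate, a seen-set for first occurrences, and in-place writes into a preallocated zero vector.
import Mathlib
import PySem

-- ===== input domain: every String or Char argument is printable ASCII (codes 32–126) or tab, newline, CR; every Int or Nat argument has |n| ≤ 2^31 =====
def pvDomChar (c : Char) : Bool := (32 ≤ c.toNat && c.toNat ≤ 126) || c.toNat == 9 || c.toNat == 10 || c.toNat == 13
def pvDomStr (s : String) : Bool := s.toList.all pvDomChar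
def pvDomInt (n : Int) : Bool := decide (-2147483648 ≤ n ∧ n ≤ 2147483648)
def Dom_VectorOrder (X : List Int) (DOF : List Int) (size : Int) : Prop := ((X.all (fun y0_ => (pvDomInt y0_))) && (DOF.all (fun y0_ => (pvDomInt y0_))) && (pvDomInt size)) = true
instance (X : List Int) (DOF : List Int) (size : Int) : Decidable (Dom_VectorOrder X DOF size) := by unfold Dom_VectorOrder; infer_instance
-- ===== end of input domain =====

-- B replaces A's per-position membership test and DOF.index rescan by one scatter
-- pass over DOF into a preallocated zero vector (objective: faster).

-- ===== PORT A =====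
def VectorOrder (X : List Int) (DOF : List Int) (size : Int) : List Int :=
  -- for i in range(0, size): if i in DOF: A.append(X[DOF.index(i)]) else A.append(0)
  -- X[row] is in range under Pre_; ported totally via pyGetD. DOF.index(i) is some
  -- under the 'i in DOF' guard, so .getD 0 is never the default there.
  (PySem.List.pyRange 0 size 1).foldl
    (fun A i =>
      if i ∈ DOF then
        A ++ [PySem.List.pyGetD X (((PySem.List.index? DOF i).getD 0 : Nat) : Int) 0]
      else
        A ++ [0]) []

-- ===== PORT B =====
-- the body of Source B's loop: if 0 <= val < size and val not in seen: seen.add(val); A[val] = X[i]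
-- A[val] = X[i] is in range for A by the guard; X[i] is in range under Pre_ (pySetD/pyGetD).
def bstep (X : List Int) (size : Int) (st : List Int × PySem.Set Int) (p : Int × Int) : List Int × PySem.Set Int :=
  if 0 ≤ p.2 ∧ p.2 < size ∧ p.2 ∉ st.2 then
    (PySem.List.pySetD st.1 p.2 (PySem.List.pyGetD X p.1 0), PySem.Set.add st.2 p.2)
  else st

def VectorOrder_alt (X : List Int) (DOF : List Int) (size : Int) : List Int :=
  -- A = [0] * size; for i, val in enumerate(DOF): bstep; return A
  ((PySem.List.enumerate DOF 0).foldl (bstep X size) (List.replicate size.toNat 0, PySem.Set.empty)).1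

-- ===== PRECONDITION & SPEC =====
-- Pre_ excludes exactly the inputs where Python A raises IndexError: some i in
-- range(size) occurs in DOF with first-occurrence index ≥ len(X) (B raises there too).
def Pre_VectorOrder (X : List Int) (DOF : List Int) (size : Int) : Prop :=
  ∀ v ∈ DOF, 0 ≤ v → v < size → DOF.idxOf v < X.length
instance (X : List Int) (DOF : List Int) (size : Int) : Decidable (Pre_VectorOrder X DOF size) := by unfold Pre_VectorOrder; infer_instance

def pvWitness_VectorOrder : List Int × List Int × Int := ([5, 7], [1, 0], 3)

def Spec_VectorOrder (X : List Int) (DOF : List Int) (size : Int) (out : List Int) : Prop := out = VectorOrder_alt X DOF size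
instance (X : List Int) (DOF : List Int) (size : Int) (out : List Int) : Decidable (Spec_VectorOrder X DOF size out) := by unfold Spec_VectorOrder; infer_instance

-- ===== CLAIM (what is proved, stated in full; the proofs are below) =====
def Claim_equal_VectorOrder : Prop := ∀ (X : List Int) (DOF : List Int) (size : Int), Dom_VectorOrder X DOF size → Pre_VectorOrder X DOF size → Spec_VectorOrder X DOF size (VectorOrder X DOF size)

-- ===== LEMMAS AND PROOFS =====

lemma idxOf?_of_mem (l : List Int) (v : Int) (h : v ∈ l) : l.idxOf? v = some (l.idxOf v) := by
  refine List.idxOf?_eq_some_iff.mpr ⟨List.idxOf_lt_length_of_mem h, List.getElem_idxOf _, ?_⟩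
  intro j hj
  have := List.not_of_lt_findIdx hj
  simpa using this

lemma pyGetD_pySetD_int (xs : List Int) (n m v d : Int)
    (h0n : 0 ≤ n) (hn : n < (xs.length : Int)) (h0m : 0 ≤ m) :
    PySem.List.pyGetD (PySem.List.pySetD xs n v) m d = if m = n then v else PySem.List.pyGetD xs m d := by
  have hne : n = ((n.toNat : Nat) : Int) := by omega
  have hme : m = ((m.toNat : Nat) : Int) := by omega
  rw [hne, hme, PySem.List.pyGetD_pySetD_natCast xs n.toNat m.toNat v d (by omega)]
  by_cases h : m.toNat = n.toNat
  · rw [if_pos h, if_pos (by omega)]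
  · rw [if_neg h, if_neg (by omega)]

lemma length_bfold (X : List Int) (size : Int) :
    ∀ (ps : List (Int × Int)) (A : List Int) (seen : PySem.Set Int),
      ((ps.foldl (bstep X size) (A, seen)).1).length = A.length := by
  intro ps
  induction ps with
  | nil => intro A seen; rfl
  | cons p ps ih =>
    intro A seen
    simp only [List.foldl_cons, bstep]
    split
    · rw [ih]; exact PySem.List.length_pySetD _ _ _
    · exact ih A seen

lemma bfold_get (X : List Int) (size : Int) :
    ∀ (s : List Int) (j : Int) (A : List Int) (seen : PySem.Set Int) (k : Int),
      0 ≤ k → k < (A.length : Int) → size ≤ (A.length : Int) →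
      PySem.List.pyGetD ((PySem.List.enumerate s j).foldl (bstep X size) (A, seen)).1 k 0 =
        if k ∈ s ∧ k ∉ seen ∧ k < size
        then PySem.List.pyGetD X (j + (s.idxOf k : Int)) 0
        else PySem.List.pyGetD A k 0 := by
  intro s
  induction s with
  | nil =>
    intro j A seen k _ _ _
    simp [PySem.List.enumerate_nil]
  | cons v s ih =>
    intro j A seen k hk0 hkA hsz
    rw [PySem.List.enumerate_cons]
    simp only [List.foldl_cons]
    by_cases hg : 0 ≤ v ∧ v < size ∧ v ∉ seen
    · -- the guard fires: write X[j] at position v, add v to seen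
      have hstep : bstep X size (A, seen) (j, v)
          = (PySem.List.pySetD A v (PySem.List.pyGetD X j 0), PySem.Set.add seen v) := by
        simp [bstep, hg]
      rw [hstep]
      have hA' : ((PySem.List.pySetD A v (PySem.List.pyGetD X j 0)).length : Int) = (A.length : Int) := by
        rw [PySem.List.length_pySetD]
      rw [ih (j + 1) _ _ k hk0 (by omega) (by omega)]
      by_cases hkv : k = v
      · subst hkv
        have hmem : k ∈ PySem.Set.add seen k := by
          rw [PySem.Set.mem_add]; right; rfl
        rw [if_neg (by tauto), if_pos ⟨List.mem_cons_self, hg.2.2, hg.2.1⟩]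
        rw [pyGetD_pySetD_int A k k _ 0 hg.1 (by omega) hk0, if_pos rfl]
        simp [List.idxOf_cons_self]
      · have hns : k ∉ PySem.Set.add seen v ↔ (k ∉ seen) := by
          rw [PySem.Set.mem_add]; tauto
        rw [pyGetD_pySetD_int A v k _ 0 hg.1 (by omega) hk0, if_neg hkv]
        by_cases hc : k ∈ s ∧ k ∉ seen ∧ k < size
        · rw [if_pos ⟨hc.1, hns.mpr hc.2.1, hc.2.2⟩,
              if_pos ⟨List.mem_cons_of_mem _ hc.1, hc.2.1, hc.2.2⟩]
          have : (v :: s).idxOf k = s.idxOf k + 1 := by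
            simp [Ne.symm hkv]
          rw [this]
          congr 1
          push_cast
          ring
        · rw [if_neg (by rw [hns]; tauto), if_neg (by
            intro h
            rcases h with ⟨h1, h2, h3⟩
            rcases List.mem_cons.mp h1 with h | h
            · exact hkv h
            · exact hc ⟨h, h2, h3⟩)]
    · -- the guard does not fire: state unchanged
      have hstep : bstep X size (A, seen) (j, v) = (A, seen) := by
        simp only [bstep]; rw [if_neg (by exact hg)]
      rw [hstep, ih (j + 1) A seen k hk0 hkA hsz]
      by_cases hkv : k = v
      · subst hkv
        rw [if_neg (by tauto), if_neg (by tauto)]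
      · by_cases hc : k ∈ s ∧ k ∉ seen ∧ k < size
        · rw [if_pos hc, if_pos ⟨List.mem_cons_of_mem _ hc.1, hc.2.1, hc.2.2⟩]
          have : (v :: s).idxOf k = s.idxOf k + 1 := by
            simp [Ne.symm hkv]
          rw [this]
          congr 1
          push_cast
          ring
        · rw [if_neg hc, if_neg (by
            intro h
            rcases h with ⟨h1, h2, h3⟩
            rcases List.mem_cons.mp h1 with h | h
            · exact hkv h
            · exact hc ⟨h, h2, h3⟩)]

-- port A as a map over the output positions
lemma vectorOrder_eq_map (X : List Int) (DOF : List Int) (size : Int) :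
    VectorOrder X DOF size = (PySem.List.pyRange 0 size 1).map
      (fun i => if i ∈ DOF then PySem.List.pyGetD X (((PySem.List.index? DOF i).getD 0 : Nat) : Int) 0 else 0) := by
  unfold VectorOrder
  rw [show (fun (A : List Int) (i : Int) =>
      if i ∈ DOF then A ++ [PySem.List.pyGetD X (((PySem.List.index? DOF i).getD 0 : Nat) : Int) 0]
      else A ++ [0])
    = (fun (A : List Int) (i : Int) => A ++ [if i ∈ DOF then PySem.List.pyGetD X (((PySem.List.index? DOF i).getD 0 : Nat) : Int) 0 else 0]) by
      funext A i; split <;> rfl]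
  rw [PySem.List.foldl_append_singleton_eq_map]
  simp

-- ===== VERDICT (by name: the statement is the Claim_ definition above) =====
theorem VectorOrder_spec : Claim_equal_VectorOrder := by
  unfold Claim_equal_VectorOrder
  intro X DOF size _ _
  unfold Spec_VectorOrder
  rw [vectorOrder_eq_map]
  have hlenB : (VectorOrder_alt X DOF size).length = size.toNat := by
    unfold VectorOrder_alt
    rw [length_bfold X size (PySem.List.enumerate DOF 0) _ _]
    exact List.length_replicate
  apply List.ext_getElem
  · simp [hlenB, PySem.List.length_pyRange_one]
  · intro k h1 h2
    have hk : k < size.toNat := by rwa [hlenB] at h2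
    have hrep : ((List.replicate size.toNat (0 : Int)).length : Int) = (size.toNat : Int) := by simp
    have hBget : PySem.List.pyGetD (VectorOrder_alt X DOF size) (k : Int) 0 =
        (VectorOrder_alt X DOF size)[k] := by
      rw [PySem.List.pyGetD_eq_getElem _ 0 (by omega) (by rw [hlenB]; exact_mod_cast hk)]
      simp
    rw [← hBget]
    unfold VectorOrder_alt
    rw [bfold_get X size DOF 0 (List.replicate size.toNat 0) PySem.Set.empty (k : Int)
        (by omega) (by rw [hrep]; exact_mod_cast hk) (by rw [hrep]; omega)]
    have hks : (k : Int) < size := by omega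
    rw [List.getElem_map, PySem.List.getElem_pyRange_one]
    by_cases hmem : ((0 : Int) + (k : Int)) ∈ DOF
    · have hmem' : (k : Int) ∈ DOF := by simpa using hmem
      rw [if_pos hmem, if_pos ⟨hmem', by simp [PySem.Set.empty], hks⟩]
      have hidx : (PySem.List.index? DOF ((0 : Int) + (k : Int))).getD 0 = DOF.idxOf ((k : Int)) := by
        rw [PySem.List.index?_eq_idxOf?]
        simp only [zero_add]
        rw [idxOf?_of_mem DOF _ hmem']
        rfl
      rw [hidx]
      simp
    · have hmem' : (k : Int) ∉ DOF := by simpa using hmem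
      rw [if_neg hmem, if_neg (by tauto)]
      rw [PySem.List.pyGetD_natCast]
      simp
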